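-- pv_equiv track=rewrite | github.com/abhishek52kj/Daily-Coding-Problem | Solutions/jumbled_sequence.py | list_order
-- ===== SOURCE A (Python) =====
-- def list_order(L):
--   K = [0]
--   max_last = 0  # Keeps track of the biggest number we have seen
--   min_last = 0  # Keeps track of the smallest number we have seen
--
--   for i in range(1, len(L)):
--     if L[i] == '+':
--       K.append(max_last + 1)
--       max_last += 1
--     elif L[i] == '-':
--       K.append(min_last - 1)
--       min_last -= 1
--   return [k - min_last for k in K]
-- ===== SOURCE B (Python) =====
-- def list_order(L):
--   signs = [c for c in L[1:] if c in ('+', '-')]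
--   M = signs.count('-')
--   return [M] + [
--       M + signs[: i + 1].count('+') if c == '+' else M - signs[: i + 1].count('-')
--       for i, c in enumerate(signs)
--   ]
-- ===== Notes on version B (the rewrite author's own statement) =====
-- stated objective: alternative
-- what changed: A keeps running max/min state while appending and finally shifts everything by a subtraction pass; B precomputes the minus count M and emits [M] followed by one value per sign computed directly from prefix sign counts of the filtered sign list, with no running extrema and no final offset pass.
import Mathlib
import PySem

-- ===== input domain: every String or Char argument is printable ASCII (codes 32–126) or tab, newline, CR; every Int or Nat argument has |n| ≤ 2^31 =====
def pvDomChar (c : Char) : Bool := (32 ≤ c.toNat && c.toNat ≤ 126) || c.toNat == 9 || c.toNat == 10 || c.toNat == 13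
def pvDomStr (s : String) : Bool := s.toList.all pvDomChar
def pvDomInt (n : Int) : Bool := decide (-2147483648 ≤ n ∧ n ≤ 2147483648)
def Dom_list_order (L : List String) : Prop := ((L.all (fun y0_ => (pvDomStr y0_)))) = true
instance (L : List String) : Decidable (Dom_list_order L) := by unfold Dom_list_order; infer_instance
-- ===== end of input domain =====

-- B replaces A's stateful running-max/min scan plus final offset pass by precomputing the
-- minus count M and computing each slot directly from prefix sign counts (objective: alternative).

-- ===== PORT A =====
-- loop body of A: the two elif branches on L[i]; any other element leaves the state unchanged
def pvStepA (st : List Int × Int × Int) (c : String) : List Int × Int × Int :=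
  if c = "+" then (st.1 ++ [st.2.1 + 1], st.2.1 + 1, st.2.2)
  else if c = "-" then (st.1 ++ [st.2.2 - 1], st.2.1, st.2.2 - 1)
  else st

def list_order (L : List String) : List Int :=
  let st := (PySem.List.pyRange 1 (PySem.List.len L) 1).foldl
      (fun st i => pvStepA st (PySem.List.pyGetD L i "")) ([0], 0, 0)
  st.1.map (fun k => k - st.2.2)

-- ===== PORT B =====
def list_order_alt (L : List String) : List Int :=
  let signs := (PySem.List.slice L (some 1) none).filter (fun c => c == "+" || c == "-")
  let M : Int := (PySem.List.count signs "-" : Int)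
  M :: (PySem.List.enumerate signs 0).map (fun q =>
    if q.2 == "+" then
      M + ((PySem.List.count (PySem.List.slice signs none (some (q.1 + 1))) "+" : Nat) : Int)
    else
      M - ((PySem.List.count (PySem.List.slice signs none (some (q.1 + 1))) "-" : Nat) : Int))

-- ===== PRECONDITION & SPEC =====
def Spec_list_order (L : List String) (out : List Int) : Prop := out = list_order_alt L
instance (L : List String) (out : List Int) : Decidable (Spec_list_order L out) := by unfold Spec_list_order; infer_instance

-- ===== CLAIM (what is proved, stated in full; the proofs are below) =====
def Claim_equal_list_order : Prop := ∀ (L : List String), Dom_list_order L → Spec_list_order L (list_order L)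

-- ===== LEMMAS AND PROOFS =====

-- the values A's loop appends, as a function of the remaining signs and the running extrema
def pvBody : List String → Int → Int → List Int
  | [], _, _ => []
  | c :: t, p, m => if c = "+" then (p + 1) :: pvBody t (p + 1) m else (m - 1) :: pvBody t p (m - 1)

theorem foldl_stepA_filter (l : List String) (st : List Int × Int × Int) :
    l.foldl pvStepA st = (l.filter (fun c => c == "+" || c == "-")).foldl pvStepA st := by
  induction l generalizing st with
  | nil => rfl
  | cons c t ih =>
    by_cases h1 : c = "+"
    · simp [h1, List.foldl_cons, ih]
    · by_cases h2 : c = "-"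
      · simp [h2, List.foldl_cons, ih]
      · simp [h1, h2, List.foldl_cons, pvStepA, ih]

theorem foldl_stepA_body (cs : List String) (hs : ∀ c ∈ cs, c = "+" ∨ c = "-") :
    ∀ (K : List Int) (p m : Int),
    cs.foldl pvStepA (K, p, m)
      = (K ++ pvBody cs p m, p + (cs.count "+" : Int), m - (cs.count "-" : Int)) := by
  induction cs with
  | nil => intro K p m; simp [pvBody]
  | cons c t ih =>
    intro K p m
    have hst : ∀ c' ∈ t, c' = "+" ∨ c' = "-" := fun c' hc' => hs c' (List.mem_cons_of_mem _ hc')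
    rcases hs c (List.mem_cons_self) with h | h
    · subst h
      simp only [List.foldl_cons, pvStepA]
      norm_num
      rw [ih hst]
      simp [pvBody]
      omega
    · subst h
      simp only [List.foldl_cons, pvStepA]
      norm_num
      rw [ih hst]
      simp [pvBody]
      omega

theorem body_map_add (cs : List String) : ∀ (p m x : Int),
    (pvBody cs p m).map (· + x) = pvBody cs (p + x) (m + x) := by
  induction cs with
  | nil => intro p m x; rfl
  | cons c t ih =>
    intro p m x
    by_cases h : c = "+"
    · have e : p + x + 1 = p + 1 + x := by ring
      simp [pvBody, h, e, ih]
    · have e : m + x - 1 = m - 1 + x := by ring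
      simp [pvBody, h, e, ih]

theorem body_key (cs : List String) (hs : ∀ c ∈ cs, c = "+" ∨ c = "-") :
    ∀ (pre : List String) (p m : Int),
    pvBody cs (p + (pre.count "+" : Int)) (m - (pre.count "-" : Int))
      = (PySem.List.enumerate cs (pre.length : Int)).map (fun q =>
          if q.2 = "+" then p + (((pre ++ cs).take (q.1.toNat + 1)).count "+" : Int)
          else m - (((pre ++ cs).take (q.1.toNat + 1)).count "-" : Int)) := by
  induction cs with
  | nil => intro pre p m; simp [pvBody, PySem.List.enumerate_nil]
  | cons c t ih =>
    intro pre p m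
    have hst : ∀ c' ∈ t, c' = "+" ∨ c' = "-" := fun c' hc' => hs c' (List.mem_cons_of_mem _ hc')
    have htake : (pre ++ c :: t).take (pre.length + 1) = pre ++ [c] := by
      rw [List.take_append]; simp
    have hidx : ((pre.length : Int)).toNat + 1 = pre.length + 1 := by simp
    rw [PySem.List.enumerate_cons, List.map_cons]
    have ih' := ih hst (pre ++ [c]) p m
    simp only [List.length_append, List.length_cons, List.length_nil, List.append_assoc,
      List.cons_append, List.nil_append, List.count_append, List.count_cons, List.count_nil] at ih'
    push_cast at ih'
    rcases hs c (List.mem_cons_self) with h | h <;> subst h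
    · rw [show pvBody ("+" :: t) (p + (pre.count "+" : Int)) (m - (pre.count "-" : Int))
          = (p + (pre.count "+" : Int) + 1) ::
              pvBody t (p + (pre.count "+" : Int) + 1) (m - (pre.count "-" : Int)) by simp [pvBody]]
      congr 1
      · simp [htake, List.count_append]
        omega
      · norm_num at ih'
        rw [show p + (pre.count "+" : Int) + 1 = p + ((pre.count "+" : Int) + 1) by ring]
        exact ih'
    · rw [show pvBody ("-" :: t) (p + (pre.count "+" : Int)) (m - (pre.count "-" : Int))
          = (m - (pre.count "-" : Int) - 1) ::
              pvBody t (p + (pre.count "+" : Int)) (m - (pre.count "-" : Int) - 1) by simp [pvBody]]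
      congr 1
      · simp [htake, List.count_append]
        omega
      · norm_num at ih'
        rw [show m - (pre.count "-" : Int) - 1 = m - ((pre.count "-" : Int) + 1) by ring]
        exact ih'

theorem list_order_eq (L : List String) : list_order L = list_order_alt L := by
  unfold list_order list_order_alt
  rw [PySem.List.foldl_pyRange_pyGetD L "" pvStepA ([0], 0, 0) (a := 1) (by norm_num)]
  rw [PySem.List.slice_from_one, ← List.drop_one]
  set signs := (L.drop 1).filter (fun c => c == "+" || c == "-") with hsigns_def
  have hs : ∀ c ∈ signs, c = "+" ∨ c = "-" := by
    intro c hc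
    have := (List.mem_filter.1 hc).2
    rcases Bool.or_eq_true_iff.1 this with h | h
    · exact Or.inl (by simpa using h)
    · exact Or.inr (by simpa using h)
  rw [show (Int.toNat 1) = 1 from rfl, foldl_stepA_filter, ← hsigns_def,
    foldl_stepA_body signs hs [0] 0 0]
  set M : Int := (signs.count "-" : Int) with hM
  -- the final list-comprehension offset of A
  have hmapA : ([0] ++ pvBody signs 0 0).map (fun k => k - (0 - M))
      = M :: pvBody signs M M := by
    rw [List.map_append]
    have h1 : ([0] : List Int).map (fun k => k - (0 - M)) = [M] := by simp
    have h2 : (pvBody signs 0 0).map (fun k => k - (0 - M)) = pvBody signs M M := by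
      have := body_map_add signs 0 0 M
      simpa [sub_sub_cancel, zero_add] using this
    rw [h1, h2]; rfl
  simp only [hmapA]
  -- identify B's mapped tail with pvBody signs M M via body_key (pre = [])
  have hkey := body_key signs hs [] M M
  simp only [List.count_nil, Nat.cast_zero, add_zero, sub_zero, List.length_nil,
    Nat.cast_zero, List.nil_append] at hkey
  rw [PySem.List.count_eq]
  congr 1
  rw [hkey]
  apply List.map_congr_left
  intro q hq
  rcases (PySem.List.mem_enumerate_iff signs 0 q).1 hq with ⟨k, hk, rfl⟩
  have hcast : ((0 : Int) + (k : Int)) + 1 = ((k + 1 : Nat) : Int) := by push_cast; ring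
  have htoNat : ((0 : Int) + (k : Int)).toNat + 1 = k + 1 := by omega
  by_cases h : signs[k] = "+"
  · simp only [h, htoNat]
    rw [hcast, PySem.List.slice_to_natCast, PySem.List.count_eq]
    simp
    exact hM
  · have hb : (signs[k] == "+") = false := by simpa using h
    simp only [h, hb, htoNat]
    rw [hcast, PySem.List.slice_to_natCast, PySem.List.count_eq]
    simp
    exact hM

-- ===== VERDICT (by name: the statement is the Claim_ definition above) =====
theorem list_order_spec : Claim_equal_list_order := by
  intro L _
  unfold Spec_list_order
  exact list_order_eq L
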